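-- pv_equiv track=rewrite | github.com/SanyamBK/dsa-practice | CSES/DP/rough.py | process_queries_and_updates
-- ===== SOURCE A (Python) =====
-- def bitwise_and_subarrays(A, l, r):
--     result = 0
--     for i in range(l, r + 1):
--         for j in range(i, r + 1):
--             subarray_and = A[i]
--             for k in range(i + 1, j + 1):
--                 subarray_and &= A[k]
--             result += subarray_and
--     return result
--
-- def process_queries_and_updates(N, A, Q, B):
--     output = []
--     for query in B:
--         if query[0] == 1:
--             l, r, v = query[1], query[2], query[3]
--             for i in range(l-1, r):
--                 A[i] = v
--         elif query[0] == 2: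
--             l, r, v = query[1], query[2], query[3]
--             for i in range(l-1, r):
--                 A[i] |= v
--         elif query[0] == 3:
--             l, r = query[1], query[2]
--             output.append(bitwise_and_subarrays(A, l-1, r-1))
--     return output
-- ===== SOURCE B (Python) =====
-- def sum_subarray_ands(seq):
--     # sum of ANDs of all nonempty subarrays: one running-AND scan per start position
--     total = 0
--     for i in range(len(seq)):
--         cur = -1
--         for x in seq[i:]:
--             cur &= x
--             total += cur
--     return total
--
-- def process_queries_and_updates(N, A, Q, B):
--     out = []
--     for q in B:
--         t = q[0]
--         if t == 1 or t == 2: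
--             l, r, v = q[1], q[2], q[3]
--             for i in range(l - 1, r):
--                 A[i] = v if t == 1 else (A[i] | v)
--         elif t == 3:
--             seq = [A[i] for i in range(q[1] - 1, q[2])]
--             out.append(sum_subarray_ands(seq))
--     return out
-- ===== Notes on version B (the rewrite author's own statement) =====
-- stated objective: alternative
-- what changed: A recomputes the AND of every subarray from scratch (triple nested loop per sum query); B keeps a running AND per start position (cur &= x while extending) and folds the two update types into one combined branch.
import Mathlib
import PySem

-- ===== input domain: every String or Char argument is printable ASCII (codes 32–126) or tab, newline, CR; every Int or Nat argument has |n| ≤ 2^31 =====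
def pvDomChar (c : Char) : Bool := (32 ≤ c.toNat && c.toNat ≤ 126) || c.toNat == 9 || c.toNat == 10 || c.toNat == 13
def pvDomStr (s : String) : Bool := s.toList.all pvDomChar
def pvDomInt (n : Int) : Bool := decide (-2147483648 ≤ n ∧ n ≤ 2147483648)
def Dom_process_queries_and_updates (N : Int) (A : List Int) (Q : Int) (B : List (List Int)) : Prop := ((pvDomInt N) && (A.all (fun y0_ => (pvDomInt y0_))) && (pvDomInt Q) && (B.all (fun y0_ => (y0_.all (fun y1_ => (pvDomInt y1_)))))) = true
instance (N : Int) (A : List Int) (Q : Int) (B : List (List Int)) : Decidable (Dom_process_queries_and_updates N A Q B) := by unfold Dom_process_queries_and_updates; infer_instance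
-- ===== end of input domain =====

-- B replaces A's per-query triple loop (AND of every subarray recomputed from scratch)
-- by a running-AND scan per start position — a different algorithm for the same value;
-- the equivalence is about the return value (both Pythons mutate the list A identically
-- in place).

-- ===== PORT A =====
def bitwise_and_subarrays (A : List Int) (l r : Int) : Int :=
  (PySem.List.pyRange l (r + 1) 1).foldl (fun result i =>
    (PySem.List.pyRange i (r + 1) 1).foldl (fun result j =>
      result +
        ((PySem.List.pyRange (i + 1) (j + 1) 1).foldl
          (fun s k => PySem.Int.band s (PySem.List.pyGetD A k 0))
          (PySem.List.pyGetD A i 0))) result) 0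

def process_queries_and_updates (N : Int) (A : List Int) (Q : Int) (B : List (List Int)) : List Int :=
  (B.foldl (fun (st : List Int × List Int) query =>
      if PySem.List.pyGetD query 0 0 = 1 then
        let l := PySem.List.pyGetD query 1 0
        let r := PySem.List.pyGetD query 2 0
        let v := PySem.List.pyGetD query 3 0
        ((PySem.List.pyRange (l - 1) r 1).foldl (fun a i => PySem.List.pySetD a i v) st.1, st.2)
      else if PySem.List.pyGetD query 0 0 = 2 then
        let l := PySem.List.pyGetD query 1 0
        let r := PySem.List.pyGetD query 2 0
        let v := PySem.List.pyGetD query 3 0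
        ((PySem.List.pyRange (l - 1) r 1).foldl
          (fun a i => PySem.List.pySetD a i (PySem.Int.bor (PySem.List.pyGetD a i 0) v)) st.1, st.2)
      else if PySem.List.pyGetD query 0 0 = 3 then
        let l := PySem.List.pyGetD query 1 0
        let r := PySem.List.pyGetD query 2 0
        (st.1, st.2 ++ [bitwise_and_subarrays st.1 (l - 1) (r - 1)])
      else st)
    (A, [])).2

-- ===== PORT B =====
-- inner 'for x in seq[i:]: cur &= x; total += cur'
def pvScanAdd (cur total : Int) (xs : List Int) : Int :=
  match xs with
  | [] => total
  | x :: rest => pvScanAdd (PySem.Int.band cur x) (total + PySem.Int.band cur x) rest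

-- outer 'for i in range(len(seq))': one running-AND scan per suffix
def pvOuter (total : Int) (xs : List Int) : Int :=
  match xs with
  | [] => total
  | x :: rest => pvOuter (pvScanAdd (-1) total (x :: rest)) rest

def sum_subarray_ands (seq : List Int) : Int := pvOuter 0 seq

def process_queries_and_updates_alt (N : Int) (A : List Int) (Q : Int) (B : List (List Int)) : List Int :=
  (B.foldl (fun (st : List Int × List Int) q =>
      let t := PySem.List.pyGetD q 0 0
      if t = 1 ∨ t = 2 then
        let l := PySem.List.pyGetD q 1 0
        let r := PySem.List.pyGetD q 2 0
        let v := PySem.List.pyGetD q 3 0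
        ((PySem.List.pyRange (l - 1) r 1).foldl
          (fun a i =>
            PySem.List.pySetD a i
              (if t = 1 then v else PySem.Int.bor (PySem.List.pyGetD a i 0) v)) st.1, st.2)
      else if t = 3 then
        let seq := (PySem.List.pyRange (PySem.List.pyGetD q 1 0 - 1) (PySem.List.pyGetD q 2 0) 1).map
          (fun i => PySem.List.pyGetD st.1 i 0)
        (st.1, st.2 ++ [sum_subarray_ands seq])
      else st)
    (A, [])).2

-- ===== PRECONDITION & SPEC =====
-- the index range [l-1, r-1] touched by a query is empty or inside the array
def pvRangeOK (l r L : Int) : Prop := r < l ∨ (-L ≤ l - 1 ∧ r ≤ L)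

-- Pre_ excludes exactly the inputs on which the Python A raises an IndexError:
-- a query that is too short for its type, or whose index range leaves the array.
def Pre_process_queries_and_updates (N : Int) (A : List Int) (Q : Int) (B : List (List Int)) : Prop :=
  ∀ q ∈ B, q ≠ [] ∧
    ((q.getD 0 0 = 1 ∨ q.getD 0 0 = 2) →
      4 ≤ q.length ∧ pvRangeOK (q.getD 1 0) (q.getD 2 0) (A.length : Int)) ∧
    (q.getD 0 0 = 3 →
      3 ≤ q.length ∧ pvRangeOK (q.getD 1 0) (q.getD 2 0) (A.length : Int))

instance (N : Int) (A : List Int) (Q : Int) (B : List (List Int)) : Decidable (Pre_process_queries_and_updates N A Q B) := by unfold Pre_process_queries_and_updates pvRangeOK; infer_instance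

def pvWitness_process_queries_and_updates : Int × List Int × Int × List (List Int) :=
  (3, [1, 2, 3], 2, [[1, 1, 2, 5], [3, 1, 3]])

def Spec_process_queries_and_updates (N : Int) (A : List Int) (Q : Int) (B : List (List Int)) (out : List Int) : Prop := out = process_queries_and_updates_alt N A Q B
instance (N : Int) (A : List Int) (Q : Int) (B : List (List Int)) (out : List Int) : Decidable (Spec_process_queries_and_updates N A Q B out) := by unfold Spec_process_queries_and_updates; infer_instance

-- ===== CLAIM (what is proved, stated in full; the proofs are below) =====
def Claim_equal_process_queries_and_updates : Prop := ∀ (N : Int) (A : List Int) (Q : Int) (B : List (List Int)), Dom_process_queries_and_updates N A Q B → Pre_process_queries_and_updates N A Q B → Spec_process_queries_and_updates N A Q B (process_queries_and_updates N A Q B)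

-- ===== LEMMAS AND PROOFS =====
-- spec of the running-AND scan: prefix-ANDs accumulated
def pvPA (c : Int) : List Int → Int
  | [] => 0
  | y :: ys => PySem.Int.band c y + pvPA (PySem.Int.band c y) ys

theorem pvScanAdd_eq (xs : List Int) : ∀ c t, pvScanAdd c t xs = t + pvPA c xs := by
  induction xs with
  | nil => intro c t; simp [pvScanAdd, pvPA]
  | cons x rest ih => intro c t; simp [pvScanAdd, pvPA, ih]; ring

-- spec of the suffix loop
def pvSS : List Int → Int
  | [] => 0
  | x :: rest => (x + pvPA x rest) + pvSS rest

theorem pvOuter_eq (xs : List Int) : ∀ t, pvOuter t xs = t + pvSS xs := by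
  induction xs with
  | nil => intro t; simp [pvOuter, pvSS]
  | cons x rest ih =>
      intro t
      have hx : PySem.Int.band (-1) x = x := by
        rw [PySem.Int.band_comm]; exact PySem.Int.band_neg_one x
      simp only [pvOuter, pvSS, ih, pvScanAdd, pvScanAdd_eq, hx]
      ring

theorem sum_subarray_ands_eq (xs : List Int) : sum_subarray_ands xs = pvSS xs := by
  simp [sum_subarray_ands, pvOuter_eq]

-- A's inner two loops, for a fixed start s and initial accumulator c
theorem inner_sum_eq (g : Int → Int) (e : Int) :
    ∀ n (s c : Int), (e - s).toNat = n →
      (((PySem.List.pyRange s e 1).map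
          (fun j => (PySem.List.pyRange s (j + 1) 1).foldl
            (fun acc k => PySem.Int.band acc (g k)) c)).sum)
        = pvPA c ((PySem.List.pyRange s e 1).map g) := by
  intro n
  induction n with
  | zero =>
      intro s c h
      rw [PySem.List.pyRange_one_eq_nil (by omega)]
      simp [pvPA]
  | succ m ih =>
      intro s c h
      rw [PySem.List.pyRange_one_cons (by omega)]
      simp only [List.map_cons, List.sum_cons, pvPA]
      rw [PySem.List.pyRange_one_singleton]
      simp only [List.foldl_cons, List.foldl_nil]
      have hcong : ((PySem.List.pyRange (s + 1) e 1).map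
          (fun j => (PySem.List.pyRange s (j + 1) 1).foldl
            (fun acc k => PySem.Int.band acc (g k)) c))
          = ((PySem.List.pyRange (s + 1) e 1).map
          (fun j => (PySem.List.pyRange (s + 1) (j + 1) 1).foldl
            (fun acc k => PySem.Int.band acc (g k)) (PySem.Int.band c (g s)))) := by
        apply List.map_congr_left
        intro j hj
        have hmem := (PySem.List.mem_pyRange_one.mp hj).1
        rw [PySem.List.pyRange_one_cons (by omega)]
        simp
      rw [hcong, ih (s + 1) (PySem.Int.band c (g s)) (by omega)]

-- the core: A's triple loop equals B's suffix-scan sum, over the same index reads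
theorem core_eq (A : List Int) (l r : Int) :
    bitwise_and_subarrays A l r
      = sum_subarray_ands ((PySem.List.pyRange l (r + 1) 1).map
          (fun i => PySem.List.pyGetD A i 0)) := by
  rw [sum_subarray_ands_eq]
  unfold bitwise_and_subarrays
  -- turn the outer fold of inner additive folds into a sum of sums
  have hstep : ∀ (acc i : Int), i ∈ PySem.List.pyRange l (r + 1) 1 →
      ((PySem.List.pyRange i (r + 1) 1).foldl (fun result j =>
        result +
          ((PySem.List.pyRange (i + 1) (j + 1) 1).foldl
            (fun s k => PySem.Int.band s (PySem.List.pyGetD A k 0))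
            (PySem.List.pyGetD A i 0))) acc)
      = acc + (((PySem.List.pyRange i (r + 1) 1).map
          (fun j => (PySem.List.pyRange (i + 1) (j + 1) 1).foldl
            (fun s k => PySem.Int.band s (PySem.List.pyGetD A k 0))
            (PySem.List.pyGetD A i 0))).sum) := by
    intro acc i _
    rw [PySem.List.foldl_add]
  have h1 :
      ((PySem.List.pyRange l (r + 1) 1).foldl (fun result i =>
        (PySem.List.pyRange i (r + 1) 1).foldl (fun result j =>
          result +
            ((PySem.List.pyRange (i + 1) (j + 1) 1).foldl
              (fun s k => PySem.Int.band s (PySem.List.pyGetD A k 0))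
              (PySem.List.pyGetD A i 0))) result) 0)
      = ((PySem.List.pyRange l (r + 1) 1).foldl (fun result i =>
          result + (((PySem.List.pyRange i (r + 1) 1).map
            (fun j => (PySem.List.pyRange (i + 1) (j + 1) 1).foldl
              (fun s k => PySem.Int.band s (PySem.List.pyGetD A k 0))
              (PySem.List.pyGetD A i 0))).sum)) 0) :=
    PySem.List.foldl_congr_mem _ _ _ 0 hstep
  rw [h1, PySem.List.foldl_add]
  simp only [zero_add]
  -- induction over the outer range
  suffices h : ∀ n (a : Int), (r + 1 - a).toNat = n →
      (((PySem.List.pyRange a (r + 1) 1).map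
        (fun i => (((PySem.List.pyRange i (r + 1) 1).map
          (fun j => (PySem.List.pyRange (i + 1) (j + 1) 1).foldl
            (fun s k => PySem.Int.band s (PySem.List.pyGetD A k 0))
            (PySem.List.pyGetD A i 0))).sum))).sum)
        = pvSS ((PySem.List.pyRange a (r + 1) 1).map (fun i => PySem.List.pyGetD A i 0)) by
    exact h _ l rfl
  intro n
  induction n with
  | zero =>
      intro a h
      rw [PySem.List.pyRange_one_eq_nil (by omega)]
      simp [pvSS]
  | succ m ih =>
      intro a h
      rw [PySem.List.pyRange_one_cons (by omega)]
      simp only [List.map_cons, List.sum_cons, pvSS]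
      rw [ih (a + 1) (by omega)]
      -- head term: T a = g a + pvPA (g a) (tail reads)
      have hhead :
          (((PySem.List.pyRange a (r + 1) 1).map
            (fun j => (PySem.List.pyRange (a + 1) (j + 1) 1).foldl
              (fun s k => PySem.Int.band s (PySem.List.pyGetD A k 0))
              (PySem.List.pyGetD A a 0))).sum)
            = PySem.List.pyGetD A a 0 +
              pvPA (PySem.List.pyGetD A a 0)
                ((PySem.List.pyRange (a + 1) (r + 1) 1).map (fun i => PySem.List.pyGetD A i 0)) := by
        rw [PySem.List.pyRange_one_cons (by omega)]
        simp only [List.map_cons, List.sum_cons]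
        rw [PySem.List.pyRange_one_eq_nil (le_refl (a + 1))]
        simp only [List.foldl_nil]
        rw [inner_sum_eq (fun k => PySem.List.pyGetD A k 0) (r + 1) _ (a + 1)
          (PySem.List.pyGetD A a 0) rfl]
      rw [hhead]

-- the two per-query step functions agree
theorem step_eq (st : List Int × List Int) (q : List Int) :
    (if PySem.List.pyGetD q 0 0 = 1 then
        ((PySem.List.pyRange (PySem.List.pyGetD q 1 0 - 1) (PySem.List.pyGetD q 2 0) 1).foldl
          (fun a i => PySem.List.pySetD a i (PySem.List.pyGetD q 3 0)) st.1, st.2)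
      else if PySem.List.pyGetD q 0 0 = 2 then
        ((PySem.List.pyRange (PySem.List.pyGetD q 1 0 - 1) (PySem.List.pyGetD q 2 0) 1).foldl
          (fun a i => PySem.List.pySetD a i (PySem.Int.bor (PySem.List.pyGetD a i 0) (PySem.List.pyGetD q 3 0))) st.1, st.2)
      else if PySem.List.pyGetD q 0 0 = 3 then
        (st.1, st.2 ++ [bitwise_and_subarrays st.1 (PySem.List.pyGetD q 1 0 - 1) (PySem.List.pyGetD q 2 0 - 1)])
      else st)
    =
    (if PySem.List.pyGetD q 0 0 = 1 ∨ PySem.List.pyGetD q 0 0 = 2 then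
        ((PySem.List.pyRange (PySem.List.pyGetD q 1 0 - 1) (PySem.List.pyGetD q 2 0) 1).foldl
          (fun a i => PySem.List.pySetD a i
            (if PySem.List.pyGetD q 0 0 = 1 then PySem.List.pyGetD q 3 0
             else PySem.Int.bor (PySem.List.pyGetD a i 0) (PySem.List.pyGetD q 3 0))) st.1, st.2)
      else if PySem.List.pyGetD q 0 0 = 3 then
        (st.1, st.2 ++ [sum_subarray_ands
          ((PySem.List.pyRange (PySem.List.pyGetD q 1 0 - 1) (PySem.List.pyGetD q 2 0) 1).map
            (fun i => PySem.List.pyGetD st.1 i 0))])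
      else st) := by
  by_cases h1 : PySem.List.pyGetD q 0 0 = 1
  · simp [h1]
  · by_cases h2 : PySem.List.pyGetD q 0 0 = 2
    · simp [h2]
    · by_cases h3 : PySem.List.pyGetD q 0 0 = 3
      · have hc : bitwise_and_subarrays st.1 (PySem.List.pyGetD q 1 0 - 1)
            (PySem.List.pyGetD q 2 0 - 1)
            = sum_subarray_ands
              ((PySem.List.pyRange (PySem.List.pyGetD q 1 0 - 1) (PySem.List.pyGetD q 2 0) 1).map
                (fun i => PySem.List.pyGetD st.1 i 0)) := by
          have := core_eq st.1 (PySem.List.pyGetD q 1 0 - 1) (PySem.List.pyGetD q 2 0 - 1)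
          rwa [show PySem.List.pyGetD q 2 0 - 1 + 1 = PySem.List.pyGetD q 2 0 by ring] at this
        simp [h3, hc]
      · simp [h1, h2, h3]

-- ===== VERDICT (by name: the statement is the Claim_ definition above) =====
theorem process_queries_and_updates_spec : Claim_equal_process_queries_and_updates := by
  intro N A Q B _ _
  unfold Spec_process_queries_and_updates process_queries_and_updates process_queries_and_updates_alt
  congr 1
  apply PySem.List.foldl_congr_mem
  intro st q _
  exact step_eq st q
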